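-- pv_equiv track=rewrite | github.com/tobiwg/bril | cs6120/Final project/GVN.py | partition_blocks
-- ===== SOURCE A (Python) =====
-- def is_label(i): return "label" in i
--
-- def block_name_of(lab): return lab["label"]
--
-- def partition_blocks(func):
--     blocks, order = {}, []
--     cur_name, cur_instrs = None, []
--     for ins in func["instrs"]:
--         if is_label(ins):
--             # If we see a label and we have seen instructions before it
--             # (a function prologue), save that prologue as an entry block.
--             if cur_name is not None:
--                 blocks[cur_name] = cur_instrs
--             else:
--                 if cur_instrs:
--                     # create a synthetic entry block for prologue
--                     entry_name = "_entry"
--                     blocks[entry_name] = cur_instrs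
--                     order.append(entry_name)
--             cur_name = block_name_of(ins)
--             order.append(cur_name)
--             cur_instrs = []
--         else:
--             cur_instrs.append(ins)
--     # If no label was ever seen, create a single entry block
--     if cur_name is None and order == []:
--         cur_name = "_entry"
--         order = [cur_name]
--     blocks[cur_name] = cur_instrs
--     return blocks, order
-- ===== SOURCE B (Python) =====
-- def partition_blocks(func):
--     # Split the instruction list from the back into a prologue and labeled
--     # segments, then assemble blocks/order from those segments.
--     prologue, labeled = [], []
--     for ins in reversed(func["instrs"]):
--         if "label" in ins:
--             labeled.insert(0, (ins["label"], prologue))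
--             prologue = []
--         else:
--             prologue.insert(0, ins)
--     if not labeled:
--         return {"_entry": prologue}, ["_entry"]
--     blocks, order = {}, []
--     if prologue:
--         blocks["_entry"] = prologue
--         order.append("_entry")
--     for name, body in labeled:
--         blocks[name] = body
--         order.append(name)
--     return blocks, order
-- ===== Notes on version B (the rewrite author's own statement) =====
-- stated objective: alternative
-- what changed: A threads a mutable (blocks, order, cur_name, cur_instrs) state through one forward loop with an end-of-loop fixup; B first splits the instruction list back-to-front into a prologue plus (label, body) segments and then assembles blocks/order from the segments in a separate pass.
import Mathlib
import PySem

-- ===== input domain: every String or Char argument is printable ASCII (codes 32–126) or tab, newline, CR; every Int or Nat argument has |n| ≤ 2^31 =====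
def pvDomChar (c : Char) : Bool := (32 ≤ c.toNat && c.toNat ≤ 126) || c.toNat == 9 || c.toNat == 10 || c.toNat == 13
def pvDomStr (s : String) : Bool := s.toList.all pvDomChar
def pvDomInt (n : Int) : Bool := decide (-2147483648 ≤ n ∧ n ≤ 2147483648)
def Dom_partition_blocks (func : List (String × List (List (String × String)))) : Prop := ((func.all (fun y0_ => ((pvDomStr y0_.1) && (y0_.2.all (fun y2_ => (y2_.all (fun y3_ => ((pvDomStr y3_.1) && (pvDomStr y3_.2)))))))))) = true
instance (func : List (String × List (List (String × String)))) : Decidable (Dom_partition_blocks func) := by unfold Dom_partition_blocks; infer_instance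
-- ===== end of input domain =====

-- B re-implements A by splitting the instruction list back-to-front into prologue + labeled
-- segments and then assembling blocks/order from the segments (objective: alternative decomposition).

-- ===== PORT A =====
-- `"label" in ins`
def pbIsLabel (ins : List (String × String)) : Bool := (PySem.Dict.mk ins).contains "label"
-- `lab["label"]` (only called when the key is present; default never used)
def pbName (ins : List (String × String)) : String := ((PySem.Dict.mk ins).get? "label").getD ""

-- the loop body of A: state = (blocks, order, cur_name, cur_instrs)
def aStep (st : PySem.Dict String (List (List (String × String))) × List String × Option String × List (List (String × String)))
    (ins : List (String × String)) :
    PySem.Dict String (List (List (String × String))) × List String × Option String × List (List (String × String)) :=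
  match st with
  | (blocks, order, curName, curInstrs) =>
    if pbIsLabel ins then
      match curName with
      | some n => (blocks.insert n curInstrs, order ++ [pbName ins], some (pbName ins), [])
      | none =>
        if curInstrs ≠ [] then
          (blocks.insert "_entry" curInstrs, order ++ ["_entry"] ++ [pbName ins], some (pbName ins), [])
        else
          (blocks, order ++ [pbName ins], some (pbName ins), [])
    else (blocks, order, curName, curInstrs ++ [ins])

-- A's code after the loop (the `curName = none` arm of getD is unreachable: order = [] ↔ curName = none)
def aFinish (st : PySem.Dict String (List (List (String × String))) × List String × Option String × List (List (String × String))) :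
    (List (String × List (List (String × String)))) × List String :=
  match st with
  | (blocks, order, curName, curInstrs) =>
    if curName = none ∧ order = [] then
      ((blocks.insert "_entry" curInstrs).items, ["_entry"])
    else
      ((blocks.insert (curName.getD "_entry") curInstrs).items, order)

def partition_blocks (func : List (String × List (List (String × String)))) : (List (String × List (List (String × String)))) × List String :=
  let instrs := (((PySem.Dict.mk func).get? "instrs").getD [])
  aFinish (instrs.foldl aStep (PySem.Dict.empty, [], none, []))

-- ===== PORT B =====
-- the reversed loop of B: right fold building (prologue, labeled segments)
def bSplit (instrs : List (List (String × String))) :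
    List (List (String × String)) × List (String × List (List (String × String))) :=
  instrs.foldr
    (fun ins st =>
      if pbIsLabel ins then ([], (pbName ins, st.1) :: st.2) else (ins :: st.1, st.2))
    ([], [])

-- B's assembly loop body
def bIns (bo : PySem.Dict String (List (List (String × String))) × List String)
    (nb : String × List (List (String × String))) :
    PySem.Dict String (List (List (String × String))) × List String :=
  (bo.1.insert nb.1 nb.2, bo.2 ++ [nb.1])

def bAssemble (p : List (List (String × String))) (ls : List (String × List (List (String × String)))) :
    (List (String × List (List (String × String)))) × List String :=
  if ls = [] then (((PySem.Dict.empty : PySem.Dict String (List (List (String × String)))).insert "_entry" p).items, ["_entry"])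
  else
    let init : PySem.Dict String (List (List (String × String))) × List String :=
      if p ≠ [] then ((PySem.Dict.empty : PySem.Dict String (List (List (String × String)))).insert "_entry" p, ["_entry"])
      else (PySem.Dict.empty, [])
    let fin := ls.foldl bIns init
    (fin.1.items, fin.2)

def partition_blocks_alt (func : List (String × List (List (String × String)))) : (List (String × List (List (String × String)))) × List String :=
  let instrs := (((PySem.Dict.mk func).get? "instrs").getD [])
  bAssemble (bSplit instrs).1 (bSplit instrs).2

-- ===== PRECONDITION & SPEC =====
-- Pre_ excludes exactly the inputs where Python A raises KeyError: func has no "instrs" key.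
def Pre_partition_blocks (func : List (String × List (List (String × String)))) : Prop :=
  (PySem.Dict.mk func).contains "instrs" = true
instance (func : List (String × List (List (String × String)))) : Decidable (Pre_partition_blocks func) := by unfold Pre_partition_blocks; infer_instance

def pvWitness_partition_blocks : (List (String × List (List (String × String)))) := [("instrs", [[("label", "x")], [("op", "ret")]])]

def Spec_partition_blocks (func : List (String × List (List (String × String)))) (out : (List (String × List (List (String × String)))) × List String) : Prop := out = partition_blocks_alt func
instance (func : List (String × List (List (String × String)))) (out : (List (String × List (List (String × String)))) × List String) : Decidable (Spec_partition_blocks func out) := by unfold Spec_partition_blocks; infer_instance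

-- ===== CLAIM (what is proved, stated in full; the proofs are below) =====
def Claim_equal_partition_blocks : Prop := ∀ (func : List (String × List (List (String × String)))), Dom_partition_blocks func → Pre_partition_blocks func → Spec_partition_blocks func (partition_blocks func)

-- ===== LEMMAS AND PROOFS =====

-- once a label has been seen, A's remaining run is B's assembly fold seeded with the pending block
lemma aFold_some (xs : List (List (String × String)))
    (b : PySem.Dict String (List (List (String × String)))) (o : List String)
    (n : String) (cur : List (List (String × String))) :
    aFinish (xs.foldl aStep (b, o, some n, cur))
      = (let fin := (bSplit xs).2.foldl bIns (b.insert n (cur ++ (bSplit xs).1), o)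
         (fin.1.items, fin.2)) := by
  induction xs generalizing b o n cur with
  | nil => simp [aFinish, bSplit]
  | cons x xs ih =>
    by_cases h : pbIsLabel x = true
    · simp only [List.foldl_cons, aStep, h, if_pos]
      rw [ih]
      simp [bSplit, h, bIns]
    · simp only [List.foldl_cons, aStep, h, if_neg, Bool.not_eq_true]
      rw [ih]
      simp [bSplit, h]

-- before any label, A's run is B's assembly of the split (cur = instructions gathered so far)
lemma aFold_none (xs : List (List (String × String)))
    (b : PySem.Dict String (List (List (String × String))))
    (cur : List (List (String × String))) :
    aFinish (xs.foldl aStep (b, [], none, cur))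
      = (if (bSplit xs).2 = [] then ((b.insert "_entry" (cur ++ (bSplit xs).1)).items, ["_entry"])
         else
           let init := if cur ++ (bSplit xs).1 ≠ [] then (b.insert "_entry" (cur ++ (bSplit xs).1), ["_entry"]) else (b, ([] : List String))
           let fin := (bSplit xs).2.foldl bIns init
           (fin.1.items, fin.2)) := by
  induction xs generalizing b cur with
  | nil => simp [aFinish, bSplit]
  | cons x xs ih =>
    by_cases h : pbIsLabel x = true
    · by_cases hc : cur = []
      · subst hc
        simp only [List.foldl_cons, aStep, h, if_pos, ne_eq, not_true_eq_false, if_neg,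
          not_false_eq_true, List.nil_append]
        rw [aFold_some]
        simp [bSplit, h, bIns]
      · simp only [List.foldl_cons, aStep, h, if_pos, ne_eq, hc, not_false_eq_true, if_pos]
        rw [aFold_some]
        simp [bSplit, h, bIns, hc]
    · simp only [List.foldl_cons, aStep, h, if_neg, Bool.not_eq_true]
      rw [ih]
      simp [bSplit, h]

-- ===== VERDICT (by name: the statement is the Claim_ definition above) =====
theorem partition_blocks_spec : Claim_equal_partition_blocks := by
  intro func _ _
  unfold Spec_partition_blocks partition_blocks partition_blocks_alt
  rw [aFold_none]
  unfold bAssemble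
  simp
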